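-- pv_equiv track=rewrite | github.com/mintropy/PS | BAEKJOON/Python/17000/17088.py | make_arithmetic_seq
-- ===== SOURCE A (Python) =====
-- def make_arithmetic_seq(N: int, seq: list[int]) -> int:
--     ans = -1
--     for i in range(-1, 2, 1):
--         for j in range(-1, 2, 1):
--             tmp = abs(i) + abs(j)
--             tmp_seq = seq[::]
--             tmp_seq[0] += i
--             tmp_seq[1] += j
--             diff = tmp_seq[1] - tmp_seq[0]
--             for k in range(2, N):
--                 _diff = tmp_seq[k] - tmp_seq[k - 1]
--                 if _diff == diff:
--                     continue
--                 if _diff == diff + 1: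
--                     tmp_seq[k] -= 1
--                     tmp += 1
--                 elif _diff == diff - 1:
--                     tmp_seq[k] += 1
--                     tmp += 1
--                 else:
--                     break
--             else:
--                 if ans == -1 or ans > tmp:
--                     ans = tmp
--     return ans
-- ===== SOURCE B (Python) =====
-- def make_arithmetic_seq(N: int, seq: list[int]) -> int:
--     # Enumerate the 5 candidate common differences; per difference, reduce the
--     # sequence to residuals seq[k] - k*d, test feasibility by the min/max window,
--     # and price each admissible start value by counting matching residuals.
--     M = max(2, N)
--     d0 = seq[1] - seq[0]
--     best = -1
--     for d in range(d0 - 2, d0 + 3):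
--         res = [seq[k] - k * d for k in range(M)]
--         lo = min(res)
--         hi = max(res)
--         for a0 in (seq[0] - 1, seq[0], seq[0] + 1):
--             if hi - 1 <= a0 <= lo + 1:
--                 cost = M - res.count(a0)
--                 if best == -1 or cost < best:
--                     best = cost
--     return best
-- ===== Notes on version B (the rewrite author's own statement) =====
-- stated objective: alternative
-- what changed: B enumerates the 5 candidate common differences, reduces the sequence once per difference to residuals seq[k]-k*d, tests feasibility with a min/max window on the residuals, and prices each admissible start value as M - res.count(a0), instead of A's 9-way enumeration of +/-1 tweaks to the first two elements each followed by a patch-and-break scan of a mutated copy.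
-- outside the precondition, e.g. on make_arithmetic_seq(5, [0, 0, 100]): A returns -1, B raises IndexError
import Mathlib
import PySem

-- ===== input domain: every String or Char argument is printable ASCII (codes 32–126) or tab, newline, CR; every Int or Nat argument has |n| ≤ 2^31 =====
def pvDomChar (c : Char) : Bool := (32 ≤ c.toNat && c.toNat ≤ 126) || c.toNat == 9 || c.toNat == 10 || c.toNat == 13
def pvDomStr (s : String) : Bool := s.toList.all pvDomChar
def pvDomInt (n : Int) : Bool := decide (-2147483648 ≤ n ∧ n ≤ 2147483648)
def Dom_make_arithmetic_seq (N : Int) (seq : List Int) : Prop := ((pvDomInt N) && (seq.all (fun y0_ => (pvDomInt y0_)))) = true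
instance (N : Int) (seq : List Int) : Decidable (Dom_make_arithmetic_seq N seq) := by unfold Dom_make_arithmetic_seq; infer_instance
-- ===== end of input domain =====

-- B enumerates the 5 candidate common differences, reduces the input once per difference
-- to residuals seq[k] - k*d, tests feasibility by a min/max window and prices each start
-- value by counting matching residuals — instead of A's 9 patch-and-break scans of a
-- mutated copy (an alternative algorithm, similar cost).

-- ===== PORT A =====
-- A's `for k in range(2, N): …` loop; fuel = remaining iterations,
-- `none` = the loop broke (skips the for-else), `some tmp` = loop completed with cost tmp.
def mas_innerA : List Int → Int → Int → Nat → Nat → Option Int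
  | _, _, tmp, _, 0 => some tmp
  | ts, diff, tmp, k, fuel+1 =>
    let dk := ts.getD k 0 - ts.getD (k-1) 0
    if dk = diff then mas_innerA ts diff tmp (k+1) fuel
    else if dk = diff + 1 then mas_innerA (ts.set k (ts.getD k 0 - 1)) diff (tmp+1) (k+1) fuel
    else if dk = diff - 1 then mas_innerA (ts.set k (ts.getD k 0 + 1)) diff (tmp+1) (k+1) fuel
    else none

-- body of A's `for j …` loop (list indexing via getD: exact, indices are in range under Pre_)
def mas_stepA (N : Int) (seq : List Int) (ans i j : Int) : Int :=
  let tmp := |i| + |j|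
  let t1 := seq.set 0 (seq.getD 0 0 + i)
  let t2 := t1.set 1 (t1.getD 1 0 + j)
  let diff := t2.getD 1 0 - t2.getD 0 0
  match mas_innerA t2 diff tmp 2 (N - 2).toNat with
  | some t => if ans = -1 ∨ ans > t then t else ans
  | none => ans

def make_arithmetic_seq (N : Int) (seq : List Int) : Int :=
  (PySem.List.pyRange (-1) 2 1).foldl (fun ans i =>
    (PySem.List.pyRange (-1) 2 1).foldl (fun ans j => mas_stepA N seq ans i j) ans) (-1)

-- ===== PORT B =====
-- body of B's `for d …` loop (indexing / min / max via getD: exact under Pre_,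
-- where every index is in range and res is nonempty since M ≥ 2)
def mas_stepB (N : Int) (seq : List Int) (best d : Int) : Int :=
  let M : Int := max 2 N
  let res : List Int := (PySem.List.pyRange 0 M 1).map (fun k => seq.getD k.toNat 0 - k * d)
  let lo : Int := (PySem.List.min? res (fun x => x)).getD 0
  let hi : Int := (PySem.List.max? res (fun x => x)).getD 0
  [seq.getD 0 0 - 1, seq.getD 0 0, seq.getD 0 0 + 1].foldl (fun best a0 =>
    if hi - 1 ≤ a0 ∧ a0 ≤ lo + 1 then
      let cost := M - (PySem.List.count res a0 : Int)
      if best = -1 ∨ cost < best then cost else best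
    else best) best

def make_arithmetic_seq_alt (N : Int) (seq : List Int) : Int :=
  let d0 : Int := seq.getD 1 0 - seq.getD 0 0
  (PySem.List.pyRange (d0 - 2) (d0 + 3) 1).foldl (fun best d => mas_stepB N seq best d) (-1)

-- ===== PRECONDITION & SPEC =====
-- Pre_ excludes the inputs where Python A raises IndexError (len(seq) < 2, or N > len(seq)
-- and some candidate's scan reaches index len(seq)).  It thereby also excludes some inputs
-- with N > len(seq) on which A happens to return -1 because all nine candidates break
-- before reaching index len(seq): the exact raise condition would re-simulate the loop.
def Pre_make_arithmetic_seq (N : Int) (seq : List Int) : Prop :=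
  2 ≤ seq.length ∧ N ≤ (seq.length : Int)
instance (N : Int) (seq : List Int) : Decidable (Pre_make_arithmetic_seq N seq) := by
  unfold Pre_make_arithmetic_seq; infer_instance

def pvWitness_make_arithmetic_seq : Int × List Int := (3, [0, 1, 5])

def Spec_make_arithmetic_seq (N : Int) (seq : List Int) (out : Int) : Prop := out = make_arithmetic_seq_alt N seq
instance (N : Int) (seq : List Int) (out : Int) : Decidable (Spec_make_arithmetic_seq N seq out) := by unfold Spec_make_arithmetic_seq; infer_instance

-- ===== CLAIM (what is proved, stated in full; the proofs are below) =====
def Claim_equal_make_arithmetic_seq : Prop := ∀ (N : Int) (seq : List Int), Dom_make_arithmetic_seq N seq → Pre_make_arithmetic_seq N seq → Spec_make_arithmetic_seq N seq (make_arithmetic_seq N seq)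

-- ===== LEMMAS AND PROOFS =====

-- residual of index k for common difference d
def pvR (seq : List Int) (d : Int) (k : Nat) : Int := seq.getD k 0 - (k : Int) * d

-- canonical evaluation of one candidate (start value a0, difference d) over indices < M:
-- `some cost` iff every residual is within 1 of a0, cost = number of mismatching indices
def candE (seq : List Int) (M : Nat) (a0 d : Int) : Option Int :=
  if (List.range M).all (fun k => decide (|pvR seq d k - a0| ≤ 1)) then
    some ((List.range M).countP (fun k => decide (pvR seq d k ≠ a0)) : Int)
  else none

-- the shared running-minimum update (A's and B's `if best == -1 or cost < best`)
def stepF (ans : Int) : Option Int → Int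
  | none => ans
  | some t => if ans = -1 ∨ ans > t then t else ans

-- minimum on Option Int (none = no feasible candidate yet)
def omin : Option Int → Option Int → Option Int
  | none, b => b
  | some x, none => some x
  | some x, some y => some (min x y)

-- proof-side reformulation of A's inner loop: scan against the closed-form target
def pvScan (seq : List Int) (a0 d : Int) : Int → Nat → Nat → Option Int
  | cost, _, 0 => some cost
  | cost, k, fuel+1 =>
    let delta := (a0 + (k : Int) * d) - seq.getD k 0
    if 1 < |delta| then none
    else pvScan seq a0 d (cost + if delta ≠ 0 then 1 else 0) (k+1) fuel

-- A's mutating inner loop computes the closed-form scan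
theorem mas_inner_eq (seq : List Int) (a0 d : Int) :
    ∀ (fuel k : Nat) (ts : List Int) (c : Int),
      ts.length = seq.length → 1 ≤ k → k + fuel ≤ seq.length →
      ts.getD (k-1) 0 = a0 + ((k : Int) - 1) * d →
      (∀ m, k ≤ m → ts.getD m 0 = seq.getD m 0) →
      mas_innerA ts d c k fuel = pvScan seq a0 d c k fuel := by
  intro fuel
  induction fuel with
  | zero => intro k ts c _ _ _ _ _; simp [mas_innerA, pvScan]
  | succ n ih =>
    intro k ts c hlen hk hbound hprev hrest
    have hklt : k < ts.length := by omega
    have hget : ts.getD k 0 = seq.getD k 0 := hrest k (le_refl k)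
    have hset_self : ∀ v : Int, (ts.set k v).getD k 0 = v := by
      intro v; simp [List.getD, hklt]
    have hset_ne : ∀ (v : Int) (m : Nat), k + 1 ≤ m → (ts.set k v).getD m 0 = seq.getD m 0 := by
      intro v m hm
      have hkm : k ≠ m := by omega
      simp only [List.getD, List.getElem?_set_ne hkm]
      simpa [List.getD] using hrest m (by omega)
    simp only [mas_innerA, pvScan]
    set δ : Int := a0 + (k : Int) * d - seq.getD k 0 with hδdef
    have hseqk : seq.getD k 0 = a0 + (k : Int) * d - δ := by rw [hδdef]; ring
    have hdk : ts.getD k 0 - ts.getD (k-1) 0 = d - δ := by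
      rw [hget, hprev, hseqk]; ring
    rw [hdk]
    have habs := abs_choice δ
    have hknat : (((k+1 : Nat)) : Int) - 1 = (k : Int) := by push_cast; ring
    by_cases h0 : δ = 0
    · rw [if_pos (by omega), if_neg (by rw [h0]; decide), if_neg (by simp [h0]), add_zero]
      refine ih (k+1) ts c hlen (by omega) (by omega) ?_ (fun m hm => hrest m (by omega))
      show ts.getD k 0 = a0 + ((((k+1 : Nat)) : Int) - 1) * d
      rw [hknat, hget, hseqk, h0]; ring
    · by_cases h1 : δ = -1
      · rw [if_neg (by omega), if_pos (by omega), if_neg (by rw [h1]; decide), if_pos h0]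
        refine ih (k+1) (ts.set k (ts.getD k 0 - 1)) (c+1) (by simpa using hlen)
          (by omega) (by omega) ?_ (fun m hm => hset_ne _ m hm)
        show (ts.set k (ts.getD k 0 - 1)).getD k 0 = a0 + ((((k+1 : Nat)) : Int) - 1) * d
        rw [hknat, hset_self, hget, hseqk, h1]; ring
      · by_cases h2 : δ = 1
        · rw [if_neg (by omega), if_neg (by omega), if_pos (by omega),
            if_neg (by rw [h2]; decide), if_pos h0]
          refine ih (k+1) (ts.set k (ts.getD k 0 + 1)) (c+1) (by simpa using hlen)
            (by omega) (by omega) ?_ (fun m hm => hset_ne _ m hm)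
          show (ts.set k (ts.getD k 0 + 1)).getD k 0 = a0 + ((((k+1 : Nat)) : Int) - 1) * d
          rw [hknat, hset_self, hget, hseqk, h2]; ring
        · have hbig : 1 < |δ| := by have hnn := abs_nonneg δ; rcases habs with h | h <;> omega
          rw [if_neg (by omega), if_neg (by omega), if_neg (by omega), if_pos hbig]

-- the scan, characterised: all residuals in [a0-1, a0+1] and count of mismatches
theorem pvScan_char (seq : List Int) (a0 d : Int) :
    ∀ (fuel k : Nat) (c : Int),
      pvScan seq a0 d c k fuel =
        if (List.range' k fuel).all (fun m => decide (|pvR seq d m - a0| ≤ 1)) then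
          some (c + ((List.range' k fuel).countP (fun m => decide (pvR seq d m ≠ a0)) : Int))
        else none := by
  intro fuel
  induction fuel with
  | zero => intro k c; simp [pvScan]
  | succ n ih =>
    intro k c
    rw [List.range'_succ]
    simp only [pvScan, List.all_cons, List.countP_cons]
    have habs : |a0 + (k : Int) * d - seq.getD k 0| = |pvR seq d k - a0| := by
      rw [pvR, show (seq.getD k 0 - (k : Int) * d - a0) = -(a0 + (k : Int) * d - seq.getD k 0) by ring, abs_neg]
    have hne : (a0 + (k : Int) * d - seq.getD k 0 ≠ 0) ↔ (pvR seq d k ≠ a0) := by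
      rw [pvR]; constructor <;> intro h' h'' <;> apply h' <;> omega
    by_cases hb : 1 < |pvR seq d k - a0|
    · rw [if_pos (by rw [habs]; exact hb)]
      have hfalse : decide (|pvR seq d k - a0| ≤ 1) = false := by simp; omega
      rw [hfalse]
      simp
    · rw [if_neg (by rw [habs]; exact hb), ih]
      have hc : decide (|pvR seq d k - a0| ≤ 1) = true := by simp; omega
      rw [hc, Bool.true_and]
      by_cases hz : pvR seq d k = a0
      · rw [if_neg (show ¬(a0 + (k : Int) * d - seq.getD k 0 ≠ 0) from by
            rw [hne]; simpa using hz),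
          if_neg (show ¬((fun m => decide (pvR seq d m ≠ a0)) k = true) from by
            simpa using hz)]
        split_ifs with h
        · congr 1; push_cast; ring
        · rfl
      · rw [if_pos (show (a0 + (k : Int) * d - seq.getD k 0 ≠ 0) from hne.mpr hz),
          if_pos (show ((fun m => decide (pvR seq d m ≠ a0)) k = true) from by
            simpa using hz)]
        split_ifs with h
        · congr 1; push_cast; ring
        · rfl

-- loop-length bookkeeping: max(2, N) as a Nat
theorem hMsplit (N : Int) : (max 2 N).toNat = 2 + (N - 2).toNat := by
  rcases le_total N 2 with h | h
  · rw [max_eq_left h]; omega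
  · rw [max_eq_right h]; omega

-- A's per-candidate step is the canonical candidate evaluation
theorem stepA_eq (N : Int) (seq : List Int) (hpre : Pre_make_arithmetic_seq N seq)
    (i j : Int) (hi : |i| ≤ 1) (hj : |j| ≤ 1) (ans : Int) :
    mas_stepA N seq ans i j =
      stepF ans (candE seq (max 2 N).toNat (seq.getD 0 0 + i)
        ((seq.getD 1 0 - seq.getD 0 0) + (j - i))) := by
  obtain ⟨hlen2, hN⟩ := hpre
  have h0lt : 0 < seq.length := by omega
  have h1lt : 1 < seq.length := by omega
  simp only [mas_stepA]
  set a0 : Int := seq.getD 0 0 + i with ha0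
  set d : Int := (seq.getD 1 0 - seq.getD 0 0) + (j - i) with hd
  set t1 : List Int := seq.set 0 (seq.getD 0 0 + i) with ht1
  set t2 : List Int := t1.set 1 (t1.getD 1 0 + j) with ht2
  have ht2len : t2.length = seq.length := by simp [ht2, ht1]
  have ht20 : t2.getD 0 0 = seq.getD 0 0 + i := by
    simp [ht2, ht1, List.getD, h0lt]
  have ht21 : t2.getD 1 0 = seq.getD 1 0 + j := by
    simp [ht2, ht1, List.getD, h1lt, h0lt]
  have hrest : ∀ m, 2 ≤ m → t2.getD m 0 = seq.getD m 0 := by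
    intro m hm
    have h1m : (1:Nat) ≠ m := by omega
    have h0m : (0:Nat) ≠ m := by omega
    simp [ht2, ht1, List.getD, List.getElem?_set_ne h1m, List.getElem?_set_ne h0m]
  have hr0 : pvR seq d 0 - a0 = -i := by
    simp only [pvR, ha0, Nat.cast_zero]; ring
  have hr1 : pvR seq d 1 - a0 = -j := by
    simp only [pvR, ha0, hd, Nat.cast_one]; ring
  have heq : mas_innerA t2 (t2.getD 1 0 - t2.getD 0 0) (|i| + |j|) 2 (N - 2).toNat
      = pvScan seq a0 d (|i| + |j|) 2 (N - 2).toNat := by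
    have hdiff : t2.getD 1 0 - t2.getD 0 0 = d := by
      rw [ht20, ht21, hd]; ring
    rw [hdiff]
    refine mas_inner_eq seq a0 d _ 2 t2 _ ht2len (by omega) (by omega) ?_ hrest
    show t2.getD 1 0 = a0 + ((2:Int) - 1) * d
    rw [ht21]; simp only [ha0, hd]; ring
  rw [heq, pvScan_char]
  have hsplit : List.range (max 2 N).toNat
      = [0, 1] ++ List.range' 2 (N - 2).toNat := by
    rw [List.range_eq_range', hMsplit N]
    have h2 : List.range' 0 2 1 ++ List.range' (0 + 1 * 2) (N - 2).toNat 1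
        = List.range' 0 (2 + (N - 2).toNat) 1 := List.range'_append
    rw [← h2]
    rfl
  have hP0 : decide (|pvR seq d 0 - a0| ≤ 1) = true := by
    rw [show |pvR seq d 0 - a0| = |i| by rw [hr0, abs_neg]]
    simpa using hi
  have hP1 : decide (|pvR seq d 1 - a0| ≤ 1) = true := by
    rw [show |pvR seq d 1 - a0| = |j| by rw [hr1, abs_neg]]
    simpa using hj
  have hi0 : (pvR seq d 0 ≠ a0) ↔ i ≠ 0 := by
    constructor <;> intro h' h'' <;> apply h' <;> omega
  have hj0 : (pvR seq d 1 ≠ a0) ↔ j ≠ 0 := by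
    constructor <;> intro h' h'' <;> apply h' <;> omega
  by_cases h : ((List.range' 2 (N - 2).toNat).all fun m => decide (|pvR seq d m - a0| ≤ 1)) = true
  · rw [if_pos h]
    have hC : candE seq (max 2 N).toNat a0 d
        = some (|i| + |j|
            + ((List.range' 2 (N - 2).toNat).countP (fun m => decide (pvR seq d m ≠ a0)) : Int)) := by
      unfold candE
      rw [hsplit, List.all_append, List.countP_append]
      simp only [List.all_cons, List.all_nil, List.countP_cons, List.countP_nil, hP0, hP1,
        Bool.true_and, Bool.and_true]
      rw [if_pos h]
      congr 1
      rcases abs_cases i with ⟨hei, _⟩ | ⟨hei, _⟩ <;>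
        rcases abs_cases j with ⟨hej, _⟩ | ⟨hej, _⟩ <;>
        by_cases hzi : i = 0 <;> by_cases hzj : j = 0 <;>
        simp only [hi0, hj0, hzi, hzj, ne_eq, not_true_eq_false, not_false_eq_true,
          decide_true, decide_false, if_true, abs_zero] <;>
        push_cast <;>
        omega
    rw [hC]
    rfl
  · rw [if_neg h]
    have hC : candE seq (max 2 N).toNat a0 d = none := by
      unfold candE
      rw [hsplit, List.all_append]
      simp only [List.all_cons, List.all_nil, hP0, hP1, Bool.true_and, Bool.and_true]
      rw [if_neg h]
    rw [hC]
    rfl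

-- candE is none when the residual at index 1 is off by ≥ 2 (the six extra B candidates)
theorem candE_bad (seq : List Int) (M : Nat) (a0 d : Int) (hM : 2 ≤ M)
    (h : 2 ≤ |seq.getD 1 0 - d - a0|) : candE seq M a0 d = none := by
  unfold candE
  rw [if_neg]
  intro hall
  rw [List.all_eq_true] at hall
  have h1 : (1 : Nat) ∈ List.range M := by rw [List.mem_range]; omega
  have := hall 1 h1
  rw [decide_eq_true_eq] at this
  rw [pvR] at this
  simp only [Nat.cast_one, one_mul] at this
  omega

-- a feasible candidate's cost is nonnegative
theorem candE_nonneg (seq : List Int) (M : Nat) (a0 d t : Int)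
    (h : candE seq M a0 d = some t) : 0 ≤ t := by
  unfold candE at h
  split_ifs at h
  have := Option.some.inj h
  subst this
  positivity

-- relation between the Int fold with -1 sentinel and the Option fold
def pvRel (ans : Int) (o : Option Int) : Prop :=
  (ans = -1 ∧ o = none) ∨ (0 ≤ ans ∧ o = some ans)

theorem fold_rel (l : List (Option Int)) (hl : ∀ o ∈ l, ∀ t, o = some t → 0 ≤ t) :
    ∀ (a : Int) (o : Option Int), pvRel a o → pvRel (l.foldl stepF a) (l.foldl omin o) := by
  have hsF : ∀ (a t : Int), stepF a (some t) = if a = -1 ∨ a > t then t else a := fun _ _ => rfl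
  have hsFn : ∀ a : Int, stepF a none = a := fun _ => rfl
  have homNn : omin none none = none := rfl
  have homSn : ∀ x : Int, omin (some x) none = some x := fun _ => rfl
  have homNs : ∀ t : Int, omin none (some t) = some t := fun _ => rfl
  have homSs : ∀ x t : Int, omin (some x) (some t) = some (min x t) := fun _ _ => rfl
  induction l with
  | nil => intro a o h; simpa using h
  | cons x xs ih =>
    intro a o h
    refine ih (fun o' ho' t ht => hl o' (List.mem_cons_of_mem x ho') t ht) _ _ ?_
    rcases x with _ | t
    · rcases h with ⟨h1, h2⟩ | ⟨h1, h2⟩ <;> subst h2 <;> rw [hsFn]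
      · rw [homNn]; exact Or.inl ⟨h1, rfl⟩
      · rw [homSn]; exact Or.inr ⟨h1, rfl⟩
    · have ht : 0 ≤ t := hl (some t) List.mem_cons_self t rfl
      rcases h with ⟨h1, h2⟩ | ⟨h1, h2⟩
      · subst h1 h2
        rw [hsF, homNs, if_pos (Or.inl rfl)]
        exact Or.inr ⟨ht, rfl⟩
      · subst h2
        rw [hsF, homSs]
        by_cases hc : a > t
        · rw [if_pos (Or.inr hc)]
          exact Or.inr ⟨ht, by rw [min_eq_right (by omega)]⟩
        · rw [if_neg (by rintro (h' | h') <;> omega)]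
          exact Or.inr ⟨h1, by rw [min_eq_left (by omega)]⟩

theorem omin_comm' (z x y : Option Int) : omin (omin z x) y = omin (omin z y) x := by
  rcases z with _ | a <;> rcases x with _ | b <;> rcases y with _ | c <;>
    simp [omin, min_comm, min_left_comm]

-- B's residual list is the residual function over range
theorem resL_eq (N : Int) (seq : List Int) (d : Int) :
    (PySem.List.pyRange 0 (max 2 N) 1).map (fun k => seq.getD k.toNat 0 - k * d)
      = (List.range (max 2 N).toNat).map (pvR seq d) := by
  rw [PySem.List.pyRange_one]
  simp only [List.map_map, sub_zero]
  apply List.map_congr_left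
  intro k _
  simp only [Function.comp_apply, zero_add, Int.toNat_natCast, pvR]

-- B's per-candidate window-and-count body is the canonical candidate evaluation
theorem bodyB_eq (N : Int) (seq : List Int) (d a0 best : Int) :
    (if ((PySem.List.max? ((List.range (max 2 N).toNat).map (pvR seq d)) (fun x => x)).getD 0) - 1 ≤ a0 ∧
        a0 ≤ ((PySem.List.min? ((List.range (max 2 N).toNat).map (pvR seq d)) (fun x => x)).getD 0) + 1 then
      if best = -1 ∨ (max 2 N) - (PySem.List.count ((List.range (max 2 N).toNat).map (pvR seq d)) a0 : Int) < best
      then (max 2 N) - (PySem.List.count ((List.range (max 2 N).toNat).map (pvR seq d)) a0 : Int) else best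
    else best) = stepF best (candE seq (max 2 N).toNat a0 d) := by
  set M' : Nat := (max 2 N).toNat with hM'
  set res : List Int := (List.range M').map (pvR seq d) with hres
  have hM2 : 2 ≤ M' := by
    have := le_max_left 2 N
    omega
  have hne : res ≠ [] := by
    rw [hres]
    simp only [ne_eq, List.map_eq_nil_iff, List.range_eq_nil]
    omega
  obtain ⟨lo, hlo⟩ : ∃ lo, PySem.List.min? res (fun x => x) = some lo := by
    rcases hmin : PySem.List.min? res (fun x => x) with _ | lo
    · rw [PySem.List.min?_eq_none_iff] at hmin
      exact absurd hmin hne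
    · exact ⟨lo, rfl⟩
  obtain ⟨hi, hhi⟩ : ∃ hi, PySem.List.max? res (fun x => x) = some hi := by
    rcases hmax : PySem.List.max? res (fun x => x) with _ | hi
    · rw [PySem.List.max?_eq_none_iff] at hmax
      exact absurd hmax hne
    · exact ⟨hi, rfl⟩
  rw [hlo, hhi]
  simp only [Option.getD_some]
  have hwin : (hi - 1 ≤ a0 ∧ a0 ≤ lo + 1) ↔
      ((List.range M').all (fun k => decide (|pvR seq d k - a0| ≤ 1)) = true) := by
    rw [List.all_eq_true]
    constructor
    · rintro ⟨h1, h2⟩ k hk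
      rw [decide_eq_true_eq]
      have hmem : pvR seq d k ∈ res := by
        rw [hres]; exact List.mem_map.mpr ⟨k, hk, rfl⟩
      have hle := PySem.List.max?_isMax hhi _ hmem
      have hge := PySem.List.min?_isMin hlo _ hmem
      simp only at hle hge
      rw [abs_le]; omega
    · intro hall
      have hhim := PySem.List.max?_mem hhi
      have hlom := PySem.List.min?_mem hlo
      rw [hres] at hhim hlom
      obtain ⟨k1, hk1, hk1e⟩ := List.mem_map.mp hhim
      obtain ⟨k2, hk2, hk2e⟩ := List.mem_map.mp hlom
      have h1 := (decide_eq_true_eq).mp (hall k1 hk1)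
      have h2 := (decide_eq_true_eq).mp (hall k2 hk2)
      rw [hk1e] at h1
      rw [hk2e] at h2
      rw [abs_le] at h1 h2
      constructor <;> omega
  unfold candE
  by_cases hw : hi - 1 ≤ a0 ∧ a0 ≤ lo + 1
  · rw [if_pos hw, if_pos (hwin.mp hw)]
    have hcount : (PySem.List.count res a0 : Int)
        = ((List.range M').countP (fun k => (pvR seq d k == a0)) : Int) := by
      rw [PySem.List.count_eq, hres, List.count_eq_countP, List.countP_map]
      rfl
    have hlen := (List.range M').length_eq_countP_add_countP (fun k => (pvR seq d k == a0))
    have hcg : (List.range M').countP (fun a => decide (¬(pvR seq d a == a0) = true))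
        = (List.range M').countP (fun k => decide (pvR seq d k ≠ a0)) := by
      apply List.countP_congr
      intro x _
      simp
    rw [hcg] at hlen
    rw [List.length_range] at hlen
    have hMc : ((M' : Int)) = max 2 N := Int.toNat_of_nonneg (by omega)
    have hval : max 2 N - (PySem.List.count res a0 : Int)
        = (((List.range M').countP (fun k => decide (pvR seq d k ≠ a0))) : Int) := by
      rw [hcount]
      omega
    rw [hval]
    rfl
  · rw [if_neg hw, if_neg (by rw [← hwin]; exact hw)]
    rfl

-- B's step over one difference d, as three canonical candidate evaluations
theorem stepB_eq (N : Int) (seq : List Int) (best d : Int) :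
    mas_stepB N seq best d =
      [seq.getD 0 0 - 1, seq.getD 0 0, seq.getD 0 0 + 1].foldl
        (fun best a0 => stepF best (candE seq (max 2 N).toNat a0 d)) best := by
  unfold mas_stepB
  simp only [resL_eq]
  simp only [List.foldl_cons, List.foldl_nil]
  rw [bodyB_eq, bodyB_eq, bodyB_eq]

-- the five differences B enumerates
theorem pyR5 (x : Int) : PySem.List.pyRange (x - 2) (x + 3) 1 = [x - 2, x - 1, x, x + 1, x + 2] := by
  rw [PySem.List.pyRange_one]
  rw [show x + 3 - (x - 2) = (5:Int) by ring]
  rw [show ((5:Int)).toNat = 5 by decide]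
  simp [List.range_succ]
  constructor
  · ring
  constructor
  · ring
  · ring

-- candidate evaluation indexed by (start offset i, difference offset e)
def pvG (seq : List Int) (M : Nat) (p : Int × Int) : Option Int :=
  candE seq M (seq.getD 0 0 + p.1) ((seq.getD 1 0 - seq.getD 0 0) + p.2)

-- A's nine candidates (i, e = j - i), in A's order
def pvLA : List (Int × Int) :=
  [(-1, 0), (-1, 1), (-1, 2), (0, -1), (0, 0), (0, 1), (1, -2), (1, -1), (1, 0)]
-- B's nine surviving candidates, in B's order (difference-major)
def pvLB : List (Int × Int) :=
  [(1, -2), (0, -1), (1, -1), (-1, 0), (0, 0), (1, 0), (-1, 1), (0, 1), (-1, 2)]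

theorem pvG_nonneg (seq : List Int) (M : Nat) (L : List (Int × Int)) :
    ∀ o ∈ L.map (pvG seq M), ∀ t, o = some t → 0 ≤ t := by
  intro o ho t ht
  obtain ⟨p, _, hpe⟩ := List.mem_map.mp ho
  subst hpe
  exact candE_nonneg seq M _ _ t ht

-- ===== VERDICT (by name: the statement is the Claim_ definition above) =====
theorem make_arithmetic_seq_spec : Claim_equal_make_arithmetic_seq := by
  intro N seq _ hpre
  unfold Spec_make_arithmetic_seq
  have hM2 : 2 ≤ (max 2 N).toNat := by
    have := le_max_left 2 N
    omega
  have hA : make_arithmetic_seq N seq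
      = (pvLA.map (pvG seq (max 2 N).toNat)).foldl stepF (-1) := by
    unfold make_arithmetic_seq
    rw [show PySem.List.pyRange (-1) 2 1 = [(-1 : Int), 0, 1] from by decide]
    simp only [List.foldl_cons, List.foldl_nil]
    rw [stepA_eq N seq hpre (-1) (-1) (by decide) (by decide),
        stepA_eq N seq hpre (-1) 0 (by decide) (by decide),
        stepA_eq N seq hpre (-1) 1 (by decide) (by decide),
        stepA_eq N seq hpre 0 (-1) (by decide) (by decide),
        stepA_eq N seq hpre 0 0 (by decide) (by decide),
        stepA_eq N seq hpre 0 1 (by decide) (by decide),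
        stepA_eq N seq hpre 1 (-1) (by decide) (by decide),
        stepA_eq N seq hpre 1 0 (by decide) (by decide),
        stepA_eq N seq hpre 1 1 (by decide) (by decide)]
    simp only [pvLA, pvG, List.map_cons, List.map_nil, List.foldl_cons, List.foldl_nil]
    norm_num
  have hsn : ∀ a : Int, stepF a none = a := fun _ => rfl
  have hB : make_arithmetic_seq_alt N seq
      = (pvLB.map (pvG seq (max 2 N).toNat)).foldl stepF (-1) := by
    show (PySem.List.pyRange (seq.getD 1 0 - seq.getD 0 0 - 2) (seq.getD 1 0 - seq.getD 0 0 + 3) 1).foldl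
        (fun best d => mas_stepB N seq best d) (-1)
      = (pvLB.map (pvG seq (max 2 N).toNat)).foldl stepF (-1)
    rw [pyR5]
    simp only [List.foldl_cons, List.foldl_nil]
    rw [stepB_eq, stepB_eq, stepB_eq, stepB_eq, stepB_eq]
    simp only [List.foldl_cons, List.foldl_nil]
    rw [candE_bad seq (max 2 N).toNat (seq.getD 0 0 - 1)
          (seq.getD 1 0 - seq.getD 0 0 - 2) hM2 (by
        rw [show seq.getD 1 0 - (seq.getD 1 0 - seq.getD 0 0 - 2) - (seq.getD 0 0 - 1)
            = (3 : Int) by ring]; decide),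
      candE_bad seq (max 2 N).toNat (seq.getD 0 0)
          (seq.getD 1 0 - seq.getD 0 0 - 2) hM2 (by
        rw [show seq.getD 1 0 - (seq.getD 1 0 - seq.getD 0 0 - 2) - (seq.getD 0 0)
            = (2 : Int) by ring]; decide),
      candE_bad seq (max 2 N).toNat (seq.getD 0 0 - 1)
          (seq.getD 1 0 - seq.getD 0 0 - 1) hM2 (by
        rw [show seq.getD 1 0 - (seq.getD 1 0 - seq.getD 0 0 - 1) - (seq.getD 0 0 - 1)
            = (2 : Int) by ring]; decide),
      candE_bad seq (max 2 N).toNat (seq.getD 0 0 + 1)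
          (seq.getD 1 0 - seq.getD 0 0 + 1) hM2 (by
        rw [show seq.getD 1 0 - (seq.getD 1 0 - seq.getD 0 0 + 1) - (seq.getD 0 0 + 1)
            = (-2 : Int) by ring]; decide),
      candE_bad seq (max 2 N).toNat (seq.getD 0 0)
          (seq.getD 1 0 - seq.getD 0 0 + 2) hM2 (by
        rw [show seq.getD 1 0 - (seq.getD 1 0 - seq.getD 0 0 + 2) - (seq.getD 0 0)
            = (-2 : Int) by ring]; decide),
      candE_bad seq (max 2 N).toNat (seq.getD 0 0 + 1)
          (seq.getD 1 0 - seq.getD 0 0 + 2) hM2 (by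
        rw [show seq.getD 1 0 - (seq.getD 1 0 - seq.getD 0 0 + 2) - (seq.getD 0 0 + 1)
            = (-3 : Int) by ring]; decide)]
    simp only [hsn]
    simp only [pvLB, pvG, List.map_cons, List.map_nil, List.foldl_cons, List.foldl_nil]
    ring_nf
  have hperm : pvLA.Perm pvLB := by decide
  have hpermg := hperm.map (pvG seq (max 2 N).toNat)
  have hfo : ((pvLA.map (pvG seq (max 2 N).toNat)).foldl omin none)
      = ((pvLB.map (pvG seq (max 2 N).toNat)).foldl omin none) :=
    hpermg.foldl_eq' (by intro x _ y _ z; exact omin_comm' z x y) none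
  have rA := fold_rel (pvLA.map (pvG seq (max 2 N).toNat))
    (pvG_nonneg seq (max 2 N).toNat pvLA) (-1) none (Or.inl ⟨rfl, rfl⟩)
  have rB := fold_rel (pvLB.map (pvG seq (max 2 N).toNat))
    (pvG_nonneg seq (max 2 N).toNat pvLB) (-1) none (Or.inl ⟨rfl, rfl⟩)
  rw [hA, hB]
  rcases rA with ⟨a1, a2⟩ | ⟨a1, a2⟩ <;> rcases rB with ⟨b1, b2⟩ | ⟨b1, b2⟩ <;>
    rw [hfo] at a2
  · rw [a1, b1]
  · rw [a2] at b2; exact absurd b2 (by simp)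
  · rw [a2] at b2; exact absurd b2.symm (by simp)
  · rw [a2] at b2; exact Option.some.inj b2
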